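-- pv_equiv track=rewrite | github.com/SPRITZ-Research-Group/SPECK | server/codeAnalysis/Rules/Rule3.py | extractPkgNames
-- ===== SOURCE A (Python) =====
-- def extractPkgNames(package):
-- 	pkgList = []
--
-- 	split = package.split('.')
-- 	pkg = split[0]+".*"
-- 	for i in range(1, len(split)-1):
-- 		pkgList.append(pkg)
-- 		pkg = pkg[0:len(pkg)-2]+"."+split[i]+".*"
--
-- 	pkgList.append(pkg[0:len(pkg)-2]+".*")
-- 	pkgList.append(pkg[0:len(pkg)-2])
-- 	pkgList.append(package)
--
-- 	return pkgList
-- ===== SOURCE B (Python) =====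
-- def extractPkgNames(package):
--     split = package.split('.')
--     p = max(1, len(split) - 1)
--     pkgList = ['.'.join(split[:i]) + '.*' for i in range(1, p + 1)]
--     pkgList.append('.'.join(split[:p]))
--     pkgList.append(package)
--     return pkgList
-- ===== Notes on version B (the rewrite author's own statement) =====
-- stated objective: simpler
-- what changed: A builds each wildcard entry by mutating an accumulator string (trimming the two-character wildcard suffix and re-appending the next segment, with extra trims after the loop); B recomputes every entry independently by joining a slice of the segment list of length i for i in 1..max(1, len(split)-1), then appends the non-wildcard prefix and the package itself.
import Mathlib
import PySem

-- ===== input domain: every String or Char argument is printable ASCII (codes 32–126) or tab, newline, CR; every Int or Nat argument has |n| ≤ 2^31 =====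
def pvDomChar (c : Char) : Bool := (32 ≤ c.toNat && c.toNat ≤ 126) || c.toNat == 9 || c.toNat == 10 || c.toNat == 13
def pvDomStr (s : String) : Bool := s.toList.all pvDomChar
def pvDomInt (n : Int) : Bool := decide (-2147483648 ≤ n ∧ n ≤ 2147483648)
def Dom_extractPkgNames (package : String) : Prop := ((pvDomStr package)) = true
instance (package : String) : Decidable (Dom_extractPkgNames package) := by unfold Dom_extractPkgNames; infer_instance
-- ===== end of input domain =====

-- B replaces A's incremental accumulator string (trim the two-character wildcard suffix,
-- re-append the next segment) by independent recomputation of each wildcard entry from a slice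
-- of the split (objective: simpler). Both ports work on List Char (PySem.Chars) and wrap to String at the end.

-- ===== PORT A =====
-- one iteration of A's for-loop: append current pkg, then pkg = pkg[0:len(pkg)-2]+"."+split[i]+".*"
def pkgStepA (split : List (List Char)) (st : List (List Char) × List Char) (i : Int) :
    List (List Char) × List Char :=
  (st.1 ++ [st.2],
   PySem.List.slice st.2 (some 0) (some ((st.2.length : Int) - 2)) ++ ['.']
     ++ PySem.List.pyGetD split i [] ++ ['.', '*'])

-- A's body over code points: split = package.split('.'); pkg = split[0]+".*"; the loop; three appends
def extractPkgNamesChars (cs : List Char) : List (List Char) :=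
  let split := PySem.Chars.splitOn cs ['.']
  let pkg0 := PySem.List.pyGetD split 0 [] ++ ['.', '*']
  let st := (PySem.List.pyRange 1 ((split.length : Int) - 1) 1).foldl (pkgStepA split) ([], pkg0)
  st.1 ++ [PySem.List.slice st.2 (some 0) (some ((st.2.length : Int) - 2)) ++ ['.', '*'],
           PySem.List.slice st.2 (some 0) (some ((st.2.length : Int) - 2))]

def extractPkgNames (package : String) : List String :=
  (extractPkgNamesChars package.toList).map String.ofList ++ [package]

-- ===== PORT B =====
-- B's body over code points: the wildcard entries, each joined from a slice split[:i] for i in range(1, p+1),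
-- then '.'.join(split[:p]); package itself is appended by the wrapper
def extractPkgNamesAltChars (cs : List Char) : List (List Char) :=
  let split := PySem.Chars.splitOn cs ['.']
  let p : Nat := max 1 (split.length - 1)
  (PySem.List.pyRange 1 ((p : Int) + 1) 1).map
      (fun i => PySem.Chars.join ['.'] (PySem.List.slice split none (some i)) ++ ['.', '*'])
    ++ [PySem.Chars.join ['.'] (PySem.List.slice split none (some (p : Int)))]

def extractPkgNames_alt (package : String) : List String :=
  (extractPkgNamesAltChars package.toList).map String.ofList ++ [package]

-- ===== PRECONDITION & SPEC =====
def Spec_extractPkgNames (package : String) (out : List String) : Prop := out = extractPkgNames_alt package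
instance (package : String) (out : List String) : Decidable (Spec_extractPkgNames package out) := by unfold Spec_extractPkgNames; infer_instance

-- ===== CLAIM (what is proved, stated in full; the proofs are below) =====
def Claim_equal_extractPkgNames : Prop := ∀ (package : String), Dom_extractPkgNames package → Spec_extractPkgNames package (extractPkgNames package)

-- ===== LEMMAS AND PROOFS =====

-- split('.') never yields the empty list
theorem splitOn_go_ne_nil (sep : List Char) (fuel : Nat) :
    ∀ (l cur : List Char) (acc : List (List Char)),
    PySem.Chars.splitOn.go sep fuel l cur acc ≠ [] := by
  induction fuel with
  | zero => intro l cur acc; simp [PySem.Chars.splitOn.go]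
  | succ n ih =>
    intro l cur acc
    cases l with
    | nil => simp [PySem.Chars.splitOn.go]
    | cons c rest =>
      rw [PySem.Chars.splitOn.go]
      split
      · exact ih _ _ _
      · exact ih _ _ _

theorem splitOn_ne_nil (cs sep : List Char) : PySem.Chars.splitOn cs sep ≠ [] :=
  splitOn_go_ne_nil _ _ _ _ _

-- the wildcard entry with i segments
def pkgP (split : List (List Char)) (i : Nat) : List Char :=
  PySem.Chars.join ['.'] (split.take i) ++ ['.', '*']

-- pkg[0:len(pkg)-2] removes exactly the two-character wildcard suffix
theorem trim_eq (l : List Char) :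
    PySem.List.slice (l ++ ['.', '*']) (some 0) (some (((l ++ ['.', '*']).length : Int) - 2)) = l := by
  rw [show (((l ++ ['.', '*']).length : Int) - 2) = ((l.length : Nat) : Int) by
        simp [List.length_append]]
  rw [PySem.List.slice_zero_start, PySem.List.slice_to_natCast, List.take_left]

theorem join_snoc (sep x : List Char) : ∀ (l : List (List Char)), l ≠ [] →
    PySem.Chars.join sep (l ++ [x]) = PySem.Chars.join sep l ++ sep ++ x := by
  intro l
  induction l with
  | nil => simp
  | cons a t ih =>
    intro _
    cases t with
    | nil => simp [PySem.Chars.join_cons_cons, PySem.Chars.join_singleton]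
    | cons b u =>
      have h := ih (by simp)
      simp only [List.cons_append] at h ⊢
      simp only [PySem.Chars.join_cons_cons, h, List.append_assoc]

theorem pkg0_eq (split : List (List Char)) (h : split ≠ []) :
    PySem.List.pyGetD split 0 [] ++ ['.', '*'] = pkgP split 1 := by
  cases split with
  | nil => exact absurd rfl h
  | cons a t =>
    show PySem.List.pyGetD (a :: t) ((0 : Nat) : Int) [] ++ _ = _
    rw [PySem.List.pyGetD_natCast]
    simp [pkgP, PySem.Chars.join_singleton]

theorem pkgP_step (split : List (List Char)) (j : Nat) (h1 : 1 ≤ j) (hj : j < split.length) :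
    PySem.Chars.join ['.'] (split.take j) ++ ['.'] ++ split.getD j [] ++ ['.', '*']
      = pkgP split (j + 1) := by
  have htake : split.take (j + 1) = split.take j ++ [split.getD j []] := by
    rw [List.take_add_one, List.getElem?_eq_getElem hj, List.getD_eq_getElem split [] hj]
    rfl
  have hne : split.take j ≠ [] := by
    have : (split.take j).length = j := by
      rw [List.length_take]; omega
    intro hnil; rw [hnil] at this; simp at this; omega
  rw [pkgP, htake, join_snoc _ _ _ hne]

theorem loop_inv (split : List (List Char)) (j : Nat) (h1 : 1 ≤ j) (hj : j ≤ split.length) :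
    (PySem.List.pyRange 1 (j : Int) 1).foldl (pkgStepA split) ([], pkgP split 1)
      = ((List.range (j - 1)).map (fun k => pkgP split (k + 1)), pkgP split j) := by
  induction j with
  | zero => omega
  | succ n ih =>
    rcases Nat.lt_or_ge n 1 with hn | hn
    · interval_cases n
      rw [show ((0 + 1 : Nat) : Int) = 1 by norm_num]
      rw [PySem.List.pyRange_one_eq_nil (le_refl (1 : Int))]
      simp
    · have hrange : PySem.List.pyRange 1 ((n + 1 : Nat) : Int) 1
          = PySem.List.pyRange 1 (n : Int) 1 ++ [(n : Int)] := by
        rw [show ((n + 1 : Nat) : Int) = (n : Int) + 1 by push_cast; ring]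
        exact PySem.List.pyRange_one_succ_right (a := 1) (b := (n : Int)) (by omega)
      rw [hrange, List.foldl_append, ih hn (by omega)]
      simp only [List.foldl_cons, List.foldl_nil, pkgStepA]
      congr 1
      · rw [show n + 1 - 1 = (n - 1) + 1 by omega, List.range_succ]
        simp [show n - 1 + 1 = n by omega]
      · rw [show pkgP split n = PySem.Chars.join ['.'] (split.take n) ++ ['.', '*'] from rfl]
        rw [trim_eq, PySem.List.pyGetD_natCast]
        rw [show PySem.Chars.join ['.'] (List.take n split) ++ ['.'] ++ split.getD n [] ++ ['.', '*']
              = pkgP split (n + 1) from pkgP_step split n hn (by omega)]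

theorem chars_eq (cs : List Char) : extractPkgNamesChars cs = extractPkgNamesAltChars cs := by
  rw [extractPkgNamesChars, extractPkgNamesAltChars]
  set split := PySem.Chars.splitOn cs ['.'] with hsplit
  have hne : split ≠ [] := splitOn_ne_nil cs ['.']
  have hlen : 1 ≤ split.length := List.length_pos_of_ne_nil hne
  set p : Nat := max 1 (split.length - 1) with hp
  -- the folded loop state
  have hst : (PySem.List.pyRange 1 ((split.length : Int) - 1) 1).foldl (pkgStepA split)
        ([], PySem.List.pyGetD split 0 [] ++ ['.', '*'])
      = ((List.range (p - 1)).map (fun k => pkgP split (k + 1)), pkgP split p) := by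
    rw [pkg0_eq split hne]
    rcases Nat.lt_or_ge split.length 2 with h2 | h2
    · have hl1 : split.length = 1 := by omega
      have hp1 : p = 1 := by omega
      rw [hl1, hp1, show ((1 : Nat) : Int) - 1 = 0 by rfl,
        PySem.List.pyRange_one_eq_nil (a := 1) (b := 0) (by omega)]
      simp
    · have hpl : p = split.length - 1 := by omega
      have hcast : (split.length : Int) - 1 = ((p : Nat) : Int) := by
        rw [hpl]; omega
      rw [hcast, loop_inv split p (by omega) (by omega)]
  rw [hst]
  -- B's wildcard list is the same entries computed from slices
  have hb : (PySem.List.pyRange 1 ((p : Int) + 1) 1).map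
        (fun i => PySem.Chars.join ['.'] (PySem.List.slice split none (some i)) ++ ['.', '*'])
      = (List.range p).map (fun k => pkgP split (k + 1)) := by
    rw [PySem.List.pyRange_one]
    rw [show ((p : Int) + 1 - 1).toNat = p by omega]
    rw [List.map_map]
    apply List.map_congr_left
    intro k hk
    simp only [Function.comp_apply]
    rw [show (1 : Int) + (k : Int) = ((k + 1 : Nat) : Int) by push_cast; ring]
    rw [PySem.List.slice_to_natCast]
    rfl
  rw [hb]
  have hlast : PySem.Chars.join ['.'] (PySem.List.slice split none (some (p : Int)))
      = PySem.Chars.join ['.'] (split.take p) := by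
    rw [PySem.List.slice_to_natCast]
  rw [hlast]
  -- fold A's second append (pkg trimmed + ".*") into the map: it is the p-th entry
  have hrange : List.range p = List.range (p - 1) ++ [p - 1] := by
    rw [show p = (p - 1) + 1 by omega, List.range_succ]
    simp
  rw [hrange, List.map_append]
  simp only [List.map_cons, List.map_nil, List.append_assoc]
  congr 2
  rw [show p - 1 + 1 = p by omega]
  rw [show pkgP split p = PySem.Chars.join ['.'] (split.take p) ++ ['.', '*'] from rfl, trim_eq]
  simp [pkgP]

-- ===== VERDICT (by name: the statement is the Claim_ definition above) =====
theorem extractPkgNames_spec : Claim_equal_extractPkgNames := by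
  intro package _
  unfold Spec_extractPkgNames extractPkgNames extractPkgNames_alt
  rw [chars_eq]
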